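-- pv_equiv track=rewrite | github.com/rosscon/rosscon_advent_of_code | 2019/day_08/01.py | parse_input_data
-- ===== SOURCE A (Python) =====
-- def parse_input_data(width, height, data):
--     layers = []
--
--     x = 0
--     y = 0
--
--     currentLayer = [[]];
--
--     for d in data:
--         currentLayer[y].append(int(d))
--
--         x += 1
--
--         if x == width:
--             x = 0
--             y += 1
--             currentLayer.append([])
--
--         if y == height:
--             y = 0
--             currentLayer = currentLayer[:-1]
--             layers.append(currentLayer)
--             currentLayer = [[]]
--
--     return layers
-- ===== SOURCE B (Python) =====
-- def parse_input_data(width, height, data):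
--     if width <= 0 or height <= 0:
--         return []
--
--     def chunks(xs, k):
--         out = []
--         while k <= len(xs):
--             out.append(xs[:k])
--             xs = xs[k:]
--         return out
--
--     digits = [int(d) for d in data]
--     return [chunks(layer, width) for layer in chunks(digits, width * height)]
-- ===== Notes on version B (the rewrite author's own statement) =====
-- stated objective: simpler
-- what changed: Replaces A's per-character x/y counter state machine (which mutates a growing currentLayer and resets counters on row/layer boundaries) by converting the digits once and slicing them with a reusable take/drop chunking helper, first into layers of width*height and then into rows of width.
-- intended difference: On height == 0 with width != 1 and nonempty data, A's 'y == height' test fires before any row is complete and A returns spurious empty layers (e.g. [[]] for (2,0,'1')), while B returns [], the intended result for a zero-height image. — e.g. on parse_input_data(2, 0, "1"): A returns [[]], B returns []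
import Mathlib
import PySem

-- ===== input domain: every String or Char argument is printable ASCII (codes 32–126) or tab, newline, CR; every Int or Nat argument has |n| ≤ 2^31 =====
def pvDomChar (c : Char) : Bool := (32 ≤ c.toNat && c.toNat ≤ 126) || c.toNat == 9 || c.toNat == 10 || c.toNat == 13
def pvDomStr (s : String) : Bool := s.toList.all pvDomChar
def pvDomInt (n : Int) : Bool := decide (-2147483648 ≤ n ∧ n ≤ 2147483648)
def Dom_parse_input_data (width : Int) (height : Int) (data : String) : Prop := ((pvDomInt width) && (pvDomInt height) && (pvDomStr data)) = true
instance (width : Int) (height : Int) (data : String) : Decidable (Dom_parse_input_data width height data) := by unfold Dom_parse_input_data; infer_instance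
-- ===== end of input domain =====

-- B replaces A's per-character x/y counter state machine by take/drop chunking (layers, then rows),
-- and returns [] on the degenerate height == 0 inputs where A's counters emit spurious empty layers (see D_ below).

-- int(d) for a single character d; Python raises ValueError on a non-digit character — those inputs
-- are excluded by Pre_parse_input_data, so the default 0 is never reached on admitted inputs.
def pvIntOfChar (c : Char) : Int := (PySem.Int.ofStr? (String.ofList [c])).getD 0

-- ===== PORT A =====
-- loop body of A: state is (x, y, currentLayer, layers); y ≥ 0 throughout, so .toNat is Python's index y
def pvStepA (width height : Int)
    (s : Int × Int × List (List Int) × List (List (List Int))) (d : Char) :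
    Int × Int × List (List Int) × List (List (List Int)) :=
  let cur := s.2.2.1.modify s.2.1.toNat (· ++ [pvIntOfChar d])  -- currentLayer[y].append(int(d))
  let x := s.1 + 1
  let s1 : Int × Int × List (List Int) :=
    if x = width then (0, s.2.1 + 1, cur ++ [[]]) else (x, s.2.1, cur)
  if s1.2.1 = height then (s1.1, 0, [[]], s.2.2.2 ++ [s1.2.2.dropLast])
  else (s1.1, s1.2.1, s1.2.2, s.2.2.2)

def parse_input_data (width : Int) (height : Int) (data : String) : List (List (List Int)) :=
  (data.toList.foldl (pvStepA width height) (0, 0, [[]], [])).2.2.2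

-- ===== PORT B =====
-- chunks(xs, k) from Source B; the callers guarantee k > 0, which also makes the recursion total here
def pvChunks (k : Nat) (xs : List Int) : List (List Int) :=
  if h : 0 < k ∧ k ≤ xs.length then xs.take k :: pvChunks k (xs.drop k) else []
  termination_by xs.length
  decreasing_by simp only [List.length_drop]; omega

def parse_input_data_alt (width : Int) (height : Int) (data : String) : List (List (List Int)) :=
  if width ≤ 0 ∨ height ≤ 0 then []
  else
    let digits := data.toList.map pvIntOfChar
    (pvChunks (width * height).toNat digits).map (pvChunks width.toNat)

-- ===== PRECONDITION & SPEC =====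
-- Pre_ excludes exactly the inputs on which A raises: int(d) raises ValueError on any non-digit character.
def Pre_parse_input_data (width : Int) (height : Int) (data : String) : Prop :=
  data.toList.all (fun c => c.isDigit) = true
instance (width : Int) (height : Int) (data : String) : Decidable (Pre_parse_input_data width height data) := by unfold Pre_parse_input_data; infer_instance

def pvWitness_parse_input_data : Int × Int × String := (2, 2, "1234")

-- On height = 0 with width ≠ 1 and nonempty data, A's y == height test fires before a row ever completes
-- and A returns spurious empty layers (e.g. [[]]), while B returns [], the intended value for a
-- zero-height image; elsewhere they agree.
def D_parse_input_data (width : Int) (height : Int) (data : String) : Prop :=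
  height = 0 ∧ width ≠ 1 ∧ data ≠ ""
instance (width : Int) (height : Int) (data : String) : Decidable (D_parse_input_data width height data) := by unfold D_parse_input_data; infer_instance

def Spec_parse_input_data (width : Int) (height : Int) (data : String) (out : List (List (List Int))) : Prop := ¬ D_parse_input_data width height data → out = parse_input_data_alt width height data
instance (width : Int) (height : Int) (data : String) (out : List (List (List Int))) : Decidable (Spec_parse_input_data width height data out) := by unfold Spec_parse_input_data; infer_instance

def pvDiffWitness_parse_input_data : Int × Int × String := (2, 0, "1")
def pvDiffWitnessOut_parse_input_data : (List (List (List Int))) × (List (List (List Int))) := ([[]], [])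

-- ===== CLAIM (what is proved, stated in full; the proofs are below) =====
def Claim_unchanged_parse_input_data : Prop := ∀ (width : Int) (height : Int) (data : String), Dom_parse_input_data width height data → Pre_parse_input_data width height data → Spec_parse_input_data width height data (parse_input_data width height data)
def Claim_changed_parse_input_data : Prop := Dom_parse_input_data (pvDiffWitness_parse_input_data.1) (pvDiffWitness_parse_input_data.2.1) (pvDiffWitness_parse_input_data.2.2) ∧ Pre_parse_input_data (pvDiffWitness_parse_input_data.1) (pvDiffWitness_parse_input_data.2.1) (pvDiffWitness_parse_input_data.2.2) ∧ D_parse_input_data (pvDiffWitness_parse_input_data.1) (pvDiffWitness_parse_input_data.2.1) (pvDiffWitness_parse_input_data.2.2) ∧ parse_input_data (pvDiffWitness_parse_input_data.1) (pvDiffWitness_parse_input_data.2.1) (pvDiffWitness_parse_input_data.2.2) = pvDiffWitnessOut_parse_input_data.1 ∧ parse_input_data_alt (pvDiffWitness_parse_input_data.1) (pvDiffWitness_parse_input_data.2.1) (pvDiffWitness_parse_input_data.2.2) = pvDiffWitnessOut_parse_input_data.2 ∧ pvDiffWitnessOut_parse_input_data.1 ≠ pvDiffWitnessOut_parse_inp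ut_data.2
def Claim_exact_parse_input_data : Prop := ∀ (width : Int) (height : Int) (data : String), Dom_parse_input_data width height data → Pre_parse_input_data width height data → D_parse_input_data width height data → parse_input_data width height data ≠ parse_input_data_alt width height data

-- ===== LEMMAS AND PROOFS =====

-- one step of A's loop, with the state tuple and nested ifs spelled out
theorem pvStepA_eq (w h x y : Int) (cur : List (List Int)) (layers : List (List (List Int))) (d : Char) :
    pvStepA w h (x, y, cur, layers) d =
      (let cur' := cur.modify y.toNat (· ++ [pvIntOfChar d])
       if x + 1 = w then
         (if y + 1 = h then ((0 : Int), (0 : Int), ([[]] : List (List Int)), layers ++ [(cur' ++ [[]]).dropLast])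
          else (0, y + 1, cur' ++ [[]], layers))
       else
         (if y = h then (x + 1, 0, [[]], layers ++ [cur'.dropLast])
          else (x + 1, y, cur', layers))) := by
  simp only [pvStepA]
  by_cases h1 : x + 1 = w <;> by_cases h2 : y + 1 = h <;> by_cases h3 : y = h <;>
    simp [h1, h2, h3]

-- pvChunks facts
theorem pvChunks_nil_of_lt (k : Nat) (xs : List Int) (h : xs.length < k) :
    pvChunks k xs = [] := by
  rw [pvChunks, dif_neg]; omega

theorem pvChunks_append (k : Nat) (as bs : List Int) (hk : 0 < k) (ha : as.length = k) :
    pvChunks k (as ++ bs) = as :: pvChunks k bs := by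
  conv_lhs => rw [pvChunks]
  rw [dif_pos (by simp [ha]; omega)]
  simp [List.drop_append, ha]

theorem pvFlatten_length (w : Nat) (rows : List (List Int))
    (h : ∀ r ∈ rows, r.length = w) : rows.flatten.length = rows.length * w := by
  induction rows with
  | nil => simp
  | cons r rs ih =>
      simp only [List.flatten_cons, List.length_append, List.length_cons]
      rw [h r (by simp), ih (fun r hr => h r (by simp [hr]))]
      ring

theorem pvChunks_flatten (w : Nat) (hw : 0 < w) (rows : List (List Int)) (rest : List Int)
    (h : ∀ r ∈ rows, r.length = w) :
    pvChunks w (rows.flatten ++ rest) = rows ++ pvChunks w rest := by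
  induction rows with
  | nil => simp
  | cons r rs ih =>
      simp only [List.flatten_cons, List.append_assoc]
      rw [pvChunks_append w r _ hw (h r (by simp)),
        ih (fun r hr => h r (by simp [hr]))]
      simp

-- modifying the freshly appended last row
theorem pvModify_last (rows : List (List Int)) (a : List Int) (f : List Int → List Int) :
    (rows ++ [a]).modify rows.length f = rows ++ [f a] := by
  induction rows with
  | nil => simp [List.modify]
  | cons x xs ih => simpa [List.modify] using ih

-- the layers component of A's fold only ever grows
theorem pvLayers_prefix (width height : Int) (cs : List Char)
    (s : Int × Int × List (List Int) × List (List (List Int))) :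
    s.2.2.2 <+: (cs.foldl (pvStepA width height) s).2.2.2 := by
  induction cs generalizing s with
  | nil => simp
  | cons c cs ih =>
      refine List.IsPrefix.trans ?_ (ih (pvStepA width height s c))
      obtain ⟨x, y, cur, layers⟩ := s
      rw [pvStepA_eq]
      simp only []
      split <;> split <;> simp

-- degenerate runs of A on which y == height never fires
theorem pvA_hneg (width height : Int) (hh : height < 0) (cs : List Char) :
    ∀ (x y : Int) (cur : List (List Int)) (layers : List (List (List Int))), 0 ≤ y →
      (cs.foldl (pvStepA width height) (x, y, cur, layers)).2.2.2 = layers := by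
  induction cs with
  | nil => intro _ _ _ _ _; simp
  | cons c cs ih =>
      intro x y cur layers hy
      rw [List.foldl_cons, pvStepA_eq]
      simp only []
      split
      · rw [if_neg (by omega)]; exact ih _ _ _ _ (by omega)
      · rw [if_neg (by omega)]; exact ih _ _ _ _ hy

theorem pvA_h0_ypos (width : Int) (cs : List Char) :
    ∀ (x y : Int) (cur : List (List Int)) (layers : List (List (List Int))), 1 ≤ y →
      (cs.foldl (pvStepA width 0) (x, y, cur, layers)).2.2.2 = layers := by
  induction cs with
  | nil => intro _ _ _ _ _; simp
  | cons c cs ih =>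
      intro x y cur layers hy
      rw [List.foldl_cons, pvStepA_eq]
      simp only []
      split
      · rw [if_neg (by omega)]; exact ih _ _ _ _ (by omega)
      · rw [if_neg (by omega)]; exact ih _ _ _ _ hy

theorem pvA_wnp (width height : Int) (hw : width ≤ 0) (hh : height ≠ 0) (cs : List Char) :
    ∀ (x : Int) (cur : List (List Int)) (layers : List (List (List Int))), 0 ≤ x →
      (cs.foldl (pvStepA width height) (x, 0, cur, layers)).2.2.2 = layers := by
  induction cs with
  | nil => intro _ _ _ _; simp
  | cons c cs ih =>
      intro x cur layers hx
      rw [List.foldl_cons, pvStepA_eq]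
      simp only []
      rw [if_neg (by omega), if_neg (by omega)]
      exact ih _ _ _ (by omega)

theorem pvRowBound (w h rl pl : Nat) (hh : 1 ≤ h) (hrl : rl < h) (hpl : pl < w) :
    rl * w + pl < w * h := by
  calc rl * w + pl < rl * w + w := by omega
    _ = (rl + 1) * w := by ring
    _ ≤ h * w := Nat.mul_le_mul_right w (by omega)
    _ = w * h := Nat.mul_comm h w

-- main invariant: w, h ≥ 1; rows are the completed rows of the current layer, part the partial row
theorem pvMain (w h : Nat) (hw : 1 ≤ w) (hh : 1 ≤ h) (cs : List Char) :
    ∀ (rows : List (List Int)) (part : List Int) (layers : List (List (List Int))),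
      (∀ r ∈ rows, r.length = w) → rows.length < h → part.length < w →
      (cs.foldl (pvStepA (w : Int) (h : Int))
          ((part.length : Int), (rows.length : Int), rows ++ [part], layers)).2.2.2
        = layers ++ (pvChunks (w * h) ((rows.flatten ++ part) ++ cs.map pvIntOfChar)).map (pvChunks w) := by
  induction cs with
  | nil =>
      intro rows part layers hr hrl hpl
      rw [List.foldl_nil, List.map_nil, List.append_nil, pvChunks_nil_of_lt]
      · simp
      · rw [List.length_append, pvFlatten_length w rows hr]
        exact pvRowBound w h rows.length part.length hh hrl hpl
  | cons c cs ih =>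
      intro rows part layers hr hrl hpl
      rw [List.foldl_cons, pvStepA_eq]
      simp only [Int.toNat_natCast, pvModify_last]
      have hmap : (c :: cs).map pvIntOfChar = [pvIntOfChar c] ++ cs.map pvIntOfChar := by simp
      by_cases hpw : part.length + 1 = w
      · rw [if_pos (by push_cast; omega)]
        by_cases hrh : rows.length + 1 = h
        · rw [if_pos (by push_cast; omega)]
          simp only [List.dropLast_concat]
          have hIH := ih [] [] (layers ++ [rows ++ [part ++ [pvIntOfChar c]]]) (by simp) hh hw
          simp only [List.length_nil, Nat.cast_zero, List.nil_append, List.flatten_nil] at hIH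
          rw [hIH]
          have hfull : (rows.flatten ++ (part ++ [pvIntOfChar c])).length = w * h := by
            rw [List.length_append, pvFlatten_length w rows hr, List.length_append]
            simp only [List.length_cons, List.length_nil]
            calc rows.length * w + (part.length + 1) = (rows.length + 1) * w := by
                  rw [hpw]; ring
              _ = w * h := by rw [hrh, Nat.mul_comm]
          rw [show (rows.flatten ++ part) ++ (c :: cs).map pvIntOfChar
              = (rows.flatten ++ (part ++ [pvIntOfChar c])) ++ cs.map pvIntOfChar by
            simp [hmap]]
          rw [pvChunks_append (w * h) _ _ (by positivity) hfull]
          rw [List.map_cons]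
          rw [pvChunks_flatten w hw rows (part ++ [pvIntOfChar c]) hr]
          rw [show part ++ [pvIntOfChar c] = (part ++ [pvIntOfChar c]) ++ [] by simp]
          rw [pvChunks_append w _ [] hw (by simp; omega)]
          rw [pvChunks_nil_of_lt w [] (by simpa using hw)]
          simp
        · rw [if_neg (by push_cast; omega)]
          have hIH := ih (rows ++ [part ++ [pvIntOfChar c]]) [] layers
            (by intro r hr'
                rcases List.mem_append.1 hr' with h1 | h1
                · exact hr r h1
                · simp only [List.mem_singleton] at h1
                  subst h1
                  simp only [List.length_append, List.length_cons, List.length_nil]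
                  omega)
            (by simp only [List.length_append, List.length_cons, List.length_nil]; omega) hw
          simp only [List.length_append, List.length_cons, List.length_nil, Nat.cast_add,
            Nat.cast_one, Nat.cast_zero, zero_add, add_zero, List.append_assoc, List.cons_append,
            List.nil_append, List.flatten_append, List.flatten_cons, List.flatten_nil,
            List.append_nil] at hIH ⊢
          rw [hIH, hmap]
          simp [List.append_assoc]
      · rw [if_neg (by push_cast; omega), if_neg (by push_cast; omega)]
        have hIH := ih rows (part ++ [pvIntOfChar c]) layers hr hrl
          (by simp only [List.length_append, List.length_cons, List.length_nil]; omega)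
        simp only [List.length_append, List.length_cons, List.length_nil, Nat.cast_add,
          Nat.cast_one, Nat.cast_zero, zero_add, add_zero] at hIH
        rw [hIH, hmap]
        simp [List.append_assoc]

-- ===== VERDICT (by name: the statement is the Claim_ definition above) =====
theorem parse_input_data_spec : Claim_unchanged_parse_input_data := by
  intro w h data _hDom _hPre hnD
  unfold parse_input_data parse_input_data_alt
  by_cases hdeg : w ≤ 0 ∨ h ≤ 0
  · rw [if_pos hdeg]
    rcases lt_trichotomy h 0 with hh | hh | hh
    · exact pvA_hneg w h hh data.toList 0 0 [[]] [] le_rfl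
    · subst hh
      have : w = 1 ∨ data = "" := by
        by_contra hc
        push_neg at hc
        exact hnD ⟨rfl, hc.1, hc.2⟩
      rcases this with hw1 | hd
      · subst hw1
        cases hdt : data.toList with
        | nil => simp
        | cons c cs =>
            rw [List.foldl_cons, pvStepA_eq]
            rw [if_pos (by omega), if_neg (by omega)]
            exact pvA_h0_ypos 1 cs _ _ _ _ le_rfl
      · subst hd; simp
    · have hw : w ≤ 0 := by omega
      exact pvA_wnp w h hw (by omega) data.toList 0 [[]] [] le_rfl
  · push_neg at hdeg
    rw [if_neg (by omega)]
    obtain ⟨w', rfl⟩ : ∃ w' : Nat, w = (w' : Int) := ⟨w.toNat, by omega⟩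
    obtain ⟨h', rfl⟩ : ∃ h' : Nat, h = (h' : Int) := ⟨h.toNat, by omega⟩
    have hw' : 1 ≤ w' := by omega
    have hh' : 1 ≤ h' := by omega
    have := pvMain w' h' hw' hh' data.toList [] [] [] (by simp) hh' hw'
    simp only [List.length_nil, Nat.cast_zero, List.nil_append, List.flatten_nil] at this
    rw [this]
    have : ((w' : Int) * (h' : Int)).toNat = w' * h' := by push_cast; omega
    rw [this, Int.toNat_natCast]

set_option maxRecDepth 4000 in
theorem parse_input_data_changed : Claim_changed_parse_input_data := by
  unfold Claim_changed_parse_input_data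
  refine ⟨by decide, by decide, by decide, ?_, by decide, by decide⟩
  show parse_input_data 2 0 "1" = [[]]
  decide

theorem parse_input_data_tight : Claim_exact_parse_input_data := by
  intro w h data _hDom _hPre hD heq
  obtain ⟨hh0, hw1, hd⟩ := hD
  subst hh0
  cases hdt : data.toList with
  | nil => exact hd (String.ext (by simpa using hdt))
  | cons c cs =>
      have hB : parse_input_data_alt w 0 data = [] := by
        unfold parse_input_data_alt
        rw [if_pos (by omega)]
      have hA : ([] : List (List Int)) :: [] <+: parse_input_data w 0 data := by
        unfold parse_input_data
        rw [hdt, List.foldl_cons, pvStepA_eq]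
        rw [if_neg (by omega), if_pos rfl]
        have h1 : ([] : List (List (List Int))) ++
            [(([[]] : List (List Int)).modify ((0 : Int)).toNat (· ++ [pvIntOfChar c])).dropLast] = [[]] := by
          simp [List.modify]
        rw [h1]
        exact pvLayers_prefix w 0 cs ((0 : Int) + 1, 0, [[]], [[]])
      rw [heq, hB] at hA
      simpa using hA
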